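-- pv_equiv track=rewrite | github.com/CrazyAngelm/llm_life-simulation | simulator.py | _map_location_name
-- ===== SOURCE A (Python) =====
-- from typing import Dict, List, Optional
--
-- def _map_location_name(original_location: str, available_locations: List[str]) -> str:
--     """Map location name to existing location"""
--     # Try exact match first
--     if original_location in available_locations:
--         return original_location
--
--     # Try to find similar location type
--     location_mapping = {
--         "Castle": ["Castle", "Fortress", "Keep", "Citadel"],
--         "Village": ["Village", "Town", "Settlement", "Hamlet"],
--         "Forest": ["Forest", "Woods", "Wilderness", "Grove"]
--     }
--
--     for available_loc in available_locations:
--         for key, variants in location_mapping.items():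
--             if original_location in variants and any(v in available_loc for v in variants):
--                 return available_loc
--
--     # Fallback to first available location
--     return available_locations[0]
-- ===== SOURCE B (Python) =====
-- def _map_location_name(original_location, available_locations):
--     """Map location name to existing location"""
--     if original_location in available_locations:
--         return original_location
--
--     location_mapping = {
--         "Castle": ["Castle", "Fortress", "Keep", "Citadel"],
--         "Village": ["Village", "Town", "Settlement", "Hamlet"],
--         "Forest": ["Forest", "Woods", "Wilderness", "Grove"]
--     }
--
--     # The (at most one, the groups being disjoint) variant group of the name.
--     variants = next((vs for vs in location_mapping.values()
--                      if original_location in vs), [])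
--
--     # Variant-outer pass: for each variant, the index of its first hit;
--     # the answer is the location at the smallest such index.
--     best = len(available_locations)
--     for v in variants:
--         for i, loc in enumerate(available_locations):
--             if v in loc:
--                 if i < best:
--                     best = i
--                 break
--
--     if best < len(available_locations):
--         return available_locations[best]
--     return available_locations[0]
-- ===== Notes on version B (the rewrite author's own statement) =====
-- stated objective: faster
-- what changed: B inverts the traversal: it looks up the (unique, groups being disjoint) variant group of original_location once, then loops variant-outer, computing for each variant the index of its first substring hit among available_locations and returning the location at the minimum such index, instead of A's location-outer loop that re-scans all three mapping entries (and re-tests membership of original_location in each) per available location.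
import Mathlib
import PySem

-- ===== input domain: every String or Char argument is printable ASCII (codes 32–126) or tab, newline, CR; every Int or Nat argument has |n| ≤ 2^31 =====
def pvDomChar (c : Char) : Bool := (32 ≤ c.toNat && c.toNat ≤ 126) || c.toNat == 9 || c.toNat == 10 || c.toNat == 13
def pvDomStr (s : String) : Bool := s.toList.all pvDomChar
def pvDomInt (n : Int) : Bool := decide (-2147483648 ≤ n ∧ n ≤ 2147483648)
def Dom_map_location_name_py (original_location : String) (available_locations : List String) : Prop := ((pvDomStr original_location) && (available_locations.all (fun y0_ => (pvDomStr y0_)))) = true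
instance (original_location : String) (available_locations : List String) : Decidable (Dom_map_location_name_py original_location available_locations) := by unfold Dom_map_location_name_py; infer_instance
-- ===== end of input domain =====

-- ===== PORT A =====
-- B inverts A's traversal (variant-outer minimum-index scan instead of A's location-outer
-- nested re-scan of the mapping); return-value equivalence on non-empty lists (Pre_).

-- The location_mapping dict literal (shared by A and B).
def pvMapping : List (String × List String) :=
  [("Castle", ["Castle", "Fortress", "Keep", "Citadel"]),
   ("Village", ["Village", "Town", "Settlement", "Hamlet"]),
   ("Forest", ["Forest", "Woods", "Wilderness", "Grove"])]

-- A's nested loop: for each available_loc, scan all mapping entries.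
def map_location_name_py (original_location : String) (available_locations : List String) : String :=
  if available_locations.contains original_location then original_location
  else
    match available_locations.find? (fun available_loc =>
        pvMapping.any (fun kv =>
          kv.2.contains original_location
            && kv.2.any (fun v => PySem.Str.isIn v available_loc))) with
    | some loc => loc
    | none => available_locations.headD ""   -- available_locations[0]; Pre_ excludes [] (IndexError)

-- ===== PORT B =====
-- Variant-outer scan: for each variant of the (unique) group of original_location,
-- the index of its first substring hit; answer = location at the minimum such index.
def map_location_name_py_alt (original_location : String) (available_locations : List String) : String :=
  if available_locations.contains original_location then original_location
  else
    let variants := ((pvMapping.find? (fun kv => kv.2.contains original_location)).map Prod.snd).getD []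
    let best := variants.foldl
      (fun b v => min b (available_locations.findIdx (fun loc => PySem.Str.isIn v loc)))
      available_locations.length
    if best < available_locations.length then available_locations.getD best ""
    else available_locations.headD ""   -- available_locations[0]; Pre_ excludes [] (IndexError)

-- ===== PRECONDITION & SPEC =====
-- Pre_ excludes only the empty list, on which A (and B) raise IndexError at available_locations[0].
def Pre_map_location_name_py (original_location : String) (available_locations : List String) : Prop :=
  available_locations ≠ []
instance (original_location : String) (available_locations : List String) : Decidable (Pre_map_location_name_py original_location available_locations) := by unfold Pre_map_location_name_py; infer_instance

def pvWitness_map_location_name_py : String × List String := ("Castle", ["Old Keep", "Grove"])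

def Spec_map_location_name_py (original_location : String) (available_locations : List String) (out : String) : Prop := out = map_location_name_py_alt original_location available_locations
instance (original_location : String) (available_locations : List String) (out : String) : Decidable (Spec_map_location_name_py original_location available_locations out) := by unfold Spec_map_location_name_py; infer_instance

-- ===== CLAIM (what is proved, stated in full; the proofs are below) =====
def Claim_equal_map_location_name_py : Prop := ∀ (original_location : String) (available_locations : List String), Dom_map_location_name_py original_location available_locations → Pre_map_location_name_py original_location available_locations → Spec_map_location_name_py original_location available_locations (map_location_name_py original_location available_locations)

-- ===== LEMMAS AND PROOFS =====

-- The three variant groups are pairwise disjoint, so A's per-location scan of all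
-- entries tests exactly the substrings of the one group B selects up front.
theorem pv_pred_eq (o loc : String) :
    pvMapping.any (fun kv => kv.2.contains o && kv.2.any (fun v => PySem.Str.isIn v loc))
      = (((pvMapping.find? (fun kv => kv.2.contains o)).map Prod.snd).getD []).any
          (fun v => PySem.Str.isIn v loc) := by
  by_cases h1 : o ∈ ["Castle", "Fortress", "Keep", "Citadel"]
  · have h2 : o ∉ ["Village", "Town", "Settlement", "Hamlet"] := by fin_cases h1 <;> decide
    have h3 : o ∉ ["Forest", "Woods", "Wilderness", "Grove"] := by fin_cases h1 <;> decide
    simp [pvMapping, h1, h2, h3]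
  · by_cases h2 : o ∈ ["Village", "Town", "Settlement", "Hamlet"]
    · have h3 : o ∉ ["Forest", "Woods", "Wilderness", "Grove"] := by fin_cases h2 <;> decide
      simp [pvMapping, h1, h2, h3]
    · by_cases h3 : o ∈ ["Forest", "Woods", "Wilderness", "Grove"]
      · simp [pvMapping, h1, h2, h3]
      · simp [pvMapping, h1, h2, h3]

-- First index of a disjunction = minimum of the first indices.
theorem pv_findIdx_or {α : Type} (p r : α → Bool) (locs : List α) :
    locs.findIdx (fun x => p x || r x) = min (locs.findIdx p) (locs.findIdx r) := by
  induction locs with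
  | nil => simp [List.findIdx_nil]
  | cons x xs ih =>
    rcases hp : p x <;> rcases hr : r x <;>
      simp only [List.findIdx_cons, hp, hr, Bool.false_or, Bool.true_or, Bool.or_false,
        Bool.or_true, cond_true, cond_false, ih] <;> omega

-- findIdx of the always-false predicate is the length.
theorem pv_findIdx_false {α : Type} (locs : List α) :
    locs.findIdx (fun _ => false) = locs.length := by
  induction locs with
  | nil => rfl
  | cons x xs ih => simp [List.findIdx_cons, ih]

-- B's variant-outer fold of minima computes the first index at which ANY variant hits.
theorem pv_fold_min {α : Type} (q : String → α → Bool) (locs : List α) :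
    ∀ (l : List String) (i : Nat), i ≤ locs.length →
      l.foldl (fun b v => min b (locs.findIdx (q v))) i
        = min i (locs.findIdx (fun x => l.any (fun v => q v x))) := by
  intro l
  induction l with
  | nil =>
    intro i hi
    simpa [pv_findIdx_false locs] using (Nat.min_eq_left hi).symm
  | cons v l' ih =>
    intro i hi
    have h1 : min i (locs.findIdx (q v)) ≤ locs.length := le_trans (Nat.min_le_left _ _) hi
    have h2 := pv_findIdx_or (q v) (fun x => l'.any (fun w => q w x)) locs
    simp only [List.foldl_cons, ih _ h1, List.any_cons]
    rw [h2]
    omega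

-- ===== VERDICT (by name: the statement is the Claim_ definition above) =====
theorem map_location_name_py_spec : Claim_equal_map_location_name_py := by
  intro o locs _ _
  unfold Spec_map_location_name_py map_location_name_py map_location_name_py_alt
  rcases hc : locs.contains o with _ | _
  · simp only [hc, Bool.false_eq_true, if_false]
    set variants := ((pvMapping.find? (fun kv => kv.2.contains o)).map Prod.snd).getD [] with hv
    have hpred : (fun available_loc => pvMapping.any (fun kv =>
          kv.2.contains o && kv.2.any (fun v => PySem.Str.isIn v available_loc)))
        = (fun available_loc => variants.any (fun v => PySem.Str.isIn v available_loc)) :=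
      funext (fun loc => pv_pred_eq o loc)
    rw [hpred]
    have hbest : variants.foldl
        (fun b v => min b (locs.findIdx (fun loc => PySem.Str.isIn v loc))) locs.length
        = locs.findIdx (fun x => variants.any (fun v => PySem.Str.isIn v x)) := by
      rw [pv_fold_min (fun v loc => PySem.Str.isIn v loc) locs variants locs.length le_rfl]
      exact Nat.min_eq_right (List.findIdx_le_length)
    rw [hbest, List.find?_eq_getElem?_findIdx]
    by_cases hlt : locs.findIdx (fun x => variants.any (fun v => PySem.Str.isIn v x)) < locs.length
    · rw [if_pos hlt, List.getD_eq_getElem?_getD, List.getElem?_eq_getElem hlt]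
      rfl
    · rw [if_neg hlt, List.getElem?_eq_none (by omega)]
  · simp only [hc, if_true]
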